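-- pv_equiv track=rewrite | github.com/PrissmaStudio/Prissma_Studios | app.py | _is_folder_selected
-- ===== SOURCE A (Python) =====
-- def _is_folder_selected(rel, selected_folders_config, volume_name=None):
--     """Verifică dacă folder-ul este selectat pentru un volum"""
--     if volume_name is None:
--         # Pentru volume noi sau când nu știm numele volumului, permite toate
--         return True
--
--     selected_folders = selected_folders_config.get(volume_name) or []
--     if not selected_folders:
--         # Dacă nu există selecții explicite, permite toate folderele
--         return True
--     for selected_folder in selected_folders:
--         if rel == selected_folder or rel.startswith(selected_folder + '/'):
--             return True
--     return False
-- ===== SOURCE B (Python) =====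
-- def _is_folder_selected(rel, selected_folders_config, volume_name=None):
--     if volume_name is None:
--         return True
--     sel = set(selected_folders_config.get(volume_name) or [])
--     if not sel:
--         return True
--     prefix = ''
--     for ch in rel:
--         if ch == '/' and prefix in sel:
--             return True
--         prefix += ch
--     return prefix in sel
-- ===== Notes on version B (the rewrite author's own statement) =====
-- stated objective: alternative
-- what changed: Instead of scanning selected_folders and testing rel against each entry with startswith, B builds a set of the selected folders once and makes a single left-to-right pass over rel, growing a prefix accumulator and returning True as soon as the prefix at a '/' boundary (or finally rel itself) is in the set.
import Mathlib
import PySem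

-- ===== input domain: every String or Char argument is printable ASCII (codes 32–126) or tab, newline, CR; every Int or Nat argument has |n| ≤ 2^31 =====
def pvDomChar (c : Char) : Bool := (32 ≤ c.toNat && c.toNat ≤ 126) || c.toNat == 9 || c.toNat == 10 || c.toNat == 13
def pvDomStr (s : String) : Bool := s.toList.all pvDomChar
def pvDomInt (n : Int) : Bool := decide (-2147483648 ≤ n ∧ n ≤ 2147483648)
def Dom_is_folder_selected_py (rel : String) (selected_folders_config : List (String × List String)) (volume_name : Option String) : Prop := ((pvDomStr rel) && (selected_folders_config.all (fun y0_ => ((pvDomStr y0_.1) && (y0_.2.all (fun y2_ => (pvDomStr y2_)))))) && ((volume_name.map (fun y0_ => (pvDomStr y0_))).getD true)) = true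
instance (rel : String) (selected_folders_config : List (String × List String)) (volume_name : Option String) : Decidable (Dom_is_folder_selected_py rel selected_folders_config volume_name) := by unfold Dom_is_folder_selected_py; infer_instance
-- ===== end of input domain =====

-- B replaces A's per-folder scan (string compare + startswith for each selected folder) by one set of the
-- selected folders and a single left-to-right pass over rel that grows a prefix accumulator and checks it
-- in the set at each '/' boundary and at the end (alternative; early return on the first hit).

-- ===== PORT A =====
def is_folder_selected_py (rel : String) (selected_folders_config : List (String × List String)) (volume_name : Option String) : Bool :=
  match volume_name with
  | none => true
  | some v =>
    -- 'selected_folders_config.get(volume_name) or []': a missing key or a found EMPTY list (falsy) both give []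
    let selected : List String :=
      match (PySem.Dict.mk selected_folders_config).get? v with
      | none => []
      | some xs => if xs.isEmpty then [] else xs
    if selected.isEmpty then true
    else
      -- for selected_folder in selected: if rel == sf or rel.startswith(sf + '/'): return True / else False
      selected.any (fun sf => rel == sf || PySem.Str.startswith rel (sf ++ "/"))

-- ===== PORT B =====
-- the 'for ch in rel' loop of Source B: prefix accumulator, early return at a matching '/' boundary,
-- final 'prefix in sel' check when the characters run out
def pvScanB (sel : PySem.Set String) (pre : List Char) : List Char → Bool
  | [] => PySem.Set.contains sel (String.ofList pre)
  | c :: cs =>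
    if c == '/' && PySem.Set.contains sel (String.ofList pre) then true
    else pvScanB sel (pre ++ [c]) cs

def is_folder_selected_py_alt (rel : String) (selected_folders_config : List (String × List String)) (volume_name : Option String) : Bool :=
  match volume_name with
  | none => true
  | some v =>
    -- sel = set(selected_folders_config.get(volume_name) or [])
    let sel : PySem.Set String := PySem.Set.ofList
      (match (PySem.Dict.mk selected_folders_config).get? v with
       | none => []
       | some xs => if xs.isEmpty then [] else xs)
    if sel.isEmpty then true
    else pvScanB sel [] rel.toList

-- ===== PRECONDITION & SPEC =====
def Spec_is_folder_selected_py (rel : String) (selected_folders_config : List (String × List String)) (volume_name : Option String) (out : Bool) : Prop := out = is_folder_selected_py_alt rel selected_folders_config volume_name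
instance (rel : String) (selected_folders_config : List (String × List String)) (volume_name : Option String) (out : Bool) : Decidable (Spec_is_folder_selected_py rel selected_folders_config volume_name out) := by unfold Spec_is_folder_selected_py; infer_instance

-- ===== CLAIM (what is proved, stated in full; the proofs are below) =====
def Claim_equal_is_folder_selected_py : Prop := ∀ (rel : String) (selected_folders_config : List (String × List String)) (volume_name : Option String), Dom_is_folder_selected_py rel selected_folders_config volume_name → Spec_is_folder_selected_py rel selected_folders_config volume_name (is_folder_selected_py rel selected_folders_config volume_name)

-- ===== LEMMAS AND PROOFS =====

-- 'sf + "/" is a prefix of r' ↔ 'sf is r cut at some '/' position'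
theorem pv_prefix_slash_iff (r s : List Char) :
    (s ++ ['/']) <+: r ↔ ∃ i : Nat, i < r.length ∧ r[i]? = some '/' ∧ s = r.take i := by
  constructor
  · rintro ⟨t, ht⟩
    refine ⟨s.length, ?_, ?_, ?_⟩
    · have := congrArg List.length ht
      simp at this; omega
    · rw [← ht]; simp
    · rw [← ht]; simp
  · rintro ⟨i, hi, hget, hs⟩
    have h1 : s ++ ['/'] = r.take (i + 1) := by
      rw [List.take_add_one, hget, hs]; rfl
    rw [h1]
    exact List.take_prefix _ _

-- what B's scan decides: some boundary prefix of pre ++ rest at or beyond pre is in sel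
theorem pvScanB_iff (sel : PySem.Set String) (pre rest : List Char) :
    pvScanB sel pre rest = true ↔
      (String.ofList (pre ++ rest) ∈ sel ∨
        ∃ i : Nat, i < rest.length ∧ rest[i]? = some '/' ∧ String.ofList (pre ++ rest.take i) ∈ sel) := by
  induction rest generalizing pre with
  | nil =>
    simp [pvScanB]
  | cons c cs ih =>
    rw [pvScanB]
    by_cases hc : (c == '/' && PySem.Set.contains sel (String.ofList pre)) = true
    · rw [if_pos hc]
      simp only [Bool.and_eq_true, beq_iff_eq, PySem.Set.contains_iff] at hc
      simp only [true_iff]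
      exact Or.inr ⟨0, by simp, by simp [hc.1], by simpa using hc.2⟩
    · rw [if_neg hc, ih]
      constructor
      · rintro (h | ⟨i, hi, hget, hmem⟩)
        · exact Or.inl (by simpa using h)
        · exact Or.inr ⟨i + 1, by simpa using hi, by simpa using hget,
            by simpa [List.take_succ_cons] using hmem⟩
      · rintro (h | ⟨i, hi, hget, hmem⟩)
        · exact Or.inl (by simpa using h)
        · cases i with
          | zero =>
            exfalso
            apply hc
            simp only [List.getElem?_cons_zero, Option.some_inj] at hget
            simp only [List.take_zero, List.append_nil] at hmem
            simp [hget, hmem]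
          | succ j =>
            exact Or.inr ⟨j, by simp at hi; omega, by simpa using hget,
              by simpa [List.take_succ_cons] using hmem⟩

-- the two scans agree for any selected list
theorem pv_main (rel : String) (selected : List String) :
    selected.any (fun sf => rel == sf || PySem.Str.startswith rel (sf ++ "/"))
      = pvScanB (PySem.Set.ofList selected) [] rel.toList := by
  rw [Bool.eq_iff_iff, pvScanB_iff]
  simp only [List.any_eq_true, Bool.or_eq_true, beq_iff_eq, List.nil_append,
    PySem.Set.mem_ofList]
  constructor
  · rintro ⟨sf, hmem, h | h⟩
    · subst h
      exact Or.inl (by simpa [String.ofList_toList] using hmem)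
    · right
      have := (PySem.Chars.startswith_iff rel.toList (sf ++ "/").toList).mp (by simpa using h)
      rw [show (sf ++ "/").toList = sf.toList ++ ['/'] by simp, pv_prefix_slash_iff] at this
      obtain ⟨i, hi, hget, hs⟩ := this
      exact ⟨i, hi, hget, by rw [← hs]; simpa [String.ofList_toList] using hmem⟩
  · rintro (h | ⟨i, hi, hget, hmem⟩)
    · exact ⟨String.ofList rel.toList, h, Or.inl (by simp [String.ofList_toList])⟩
    · refine ⟨String.ofList (rel.toList.take i), hmem, Or.inr ?_⟩
      simp only [PySem.Str.startswith_eq]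
      rw [PySem.Chars.startswith_iff, show (String.ofList (rel.toList.take i) ++ "/").toList
        = rel.toList.take i ++ ['/'] by simp [String.toList_ofList]]
      exact (pv_prefix_slash_iff _ _).mpr ⟨i, hi, hget, rfl⟩

-- building the set does not change emptiness
theorem pv_ofList_isEmpty (xs : List String) : (PySem.Set.ofList xs).isEmpty = xs.isEmpty := by
  rw [Bool.eq_iff_iff]
  simp only [List.isEmpty_iff, List.eq_nil_iff_forall_not_mem, PySem.Set.mem_ofList]

-- the common branch structure of both ports around the scans
theorem pv_branch (rel : String) (selected : List String) :
    (if selected.isEmpty then true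
      else selected.any (fun sf => rel == sf || PySem.Str.startswith rel (sf ++ "/")))
      = (if (PySem.Set.ofList selected).isEmpty then true
          else pvScanB (PySem.Set.ofList selected) [] rel.toList) := by
  rw [pv_ofList_isEmpty]
  split
  · rfl
  · exact pv_main rel selected

-- ===== VERDICT (by name: the statement is the Claim_ definition above) =====
theorem is_folder_selected_py_spec : Claim_equal_is_folder_selected_py := by
  intro rel cfg vn _
  unfold Spec_is_folder_selected_py is_folder_selected_py is_folder_selected_py_alt
  match vn with
  | none => rfl
  | some v =>
    simp only
    cases h : (PySem.Dict.mk cfg).get? v with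
    | none => exact pv_branch rel _
    | some xs => exact pv_branch rel _
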